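-- pv_equiv track=rewrite | github.com/Cassar88226/BPE-tokenizer | text preprocessing.py | find_bpe_operation
-- ===== SOURCE A (Python) =====
-- def find_bpe_operation(pairs, bpe_operations):
--     matched_pair = ()
--     for i, bpe in enumerate(bpe_operations):
--         for pair in pairs:
--             if bpe == pair:
--                 matched_pair = bpe
--                 return matched_pair, i
--     return matched_pair, -1
-- ===== SOURCE B (Python) =====
-- def find_bpe_operation(pairs, bpe_operations):
--     # Precompute first-occurrence index of each operation, then scan pairs once
--     # tracking the minimum index found.
--     idx = {}
--     i = 0
--     for bpe in bpe_operations: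
--         key = tuple(bpe)
--         if key not in idx:
--             idx[key] = i
--         i += 1
--     best = ()
--     best_i = -1
--     for pair in pairs:
--         j = idx.get(tuple(pair))
--         if j is not None and (best_i == -1 or j < best_i):
--             best = pair
--             best_i = j
--     return best, best_i
-- ===== Notes on version B (the rewrite author's own statement) =====
-- stated objective: alternative
-- what changed: Instead of a nested rescan of pairs for every operation, B builds a first-occurrence index table over bpe_operations once and makes a single pass over pairs tracking the minimum index.
import Mathlib
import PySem

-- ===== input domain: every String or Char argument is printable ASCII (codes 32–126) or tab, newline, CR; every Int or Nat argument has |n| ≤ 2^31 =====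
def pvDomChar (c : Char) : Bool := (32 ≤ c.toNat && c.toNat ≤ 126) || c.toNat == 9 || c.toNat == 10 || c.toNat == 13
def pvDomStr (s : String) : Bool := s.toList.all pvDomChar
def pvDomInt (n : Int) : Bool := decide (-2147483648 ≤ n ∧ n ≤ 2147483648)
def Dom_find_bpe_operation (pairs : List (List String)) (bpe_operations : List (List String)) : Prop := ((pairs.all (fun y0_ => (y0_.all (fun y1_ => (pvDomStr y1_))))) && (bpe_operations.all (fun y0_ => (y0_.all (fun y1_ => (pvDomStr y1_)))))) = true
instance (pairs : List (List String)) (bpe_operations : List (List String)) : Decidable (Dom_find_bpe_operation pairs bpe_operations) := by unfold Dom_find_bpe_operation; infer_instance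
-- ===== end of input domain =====

-- B replaces A's nested rescan of pairs by a precomputed first-occurrence index table over bpe_operations plus one pass over pairs tracking the minimum index (alternative algorithm).


-- ===== PORT A =====
-- inner loop: 'for pair in pairs: if bpe == pair: return …' — true iff some pair equals bpe
def pvInnerA (bpe : List String) : List (List String) → Bool
  | [] => false
  | pair :: rest => if bpe == pair then true else pvInnerA bpe rest

-- outer loop: 'for i, bpe in enumerate(bpe_operations)', carried index i
def pvOuterA (pairs : List (List String)) (i : Int) : List (List String) → List String × Int
  | [] => ([], -1)
  | bpe :: rest => if pvInnerA bpe pairs then (bpe, i) else pvOuterA pairs (i + 1) rest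

def find_bpe_operation (pairs : List (List String)) (bpe_operations : List (List String)) : List String × Int :=
  pvOuterA pairs 0 bpe_operations

-- ===== PORT B =====
-- 'for bpe in bpe_operations: if key not in idx: idx[key] = i; i += 1'
def pvBuildIdx (i : Int) (d : PySem.Dict (List String) Int) : List (List String) → PySem.Dict (List String) Int
  | [] => d
  | bpe :: rest => pvBuildIdx (i + 1) (if (d.get? bpe).isNone then d.insert bpe i else d) rest

-- 'for pair in pairs: j = idx.get(pair); if j is not None and (best_i == -1 or j < best_i): …'
def pvScanB (idx : PySem.Dict (List String) Int) (best : List String) (besti : Int) :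
    List (List String) → List String × Int
  | [] => (best, besti)
  | pair :: rest =>
    match idx.get? pair with
    | some j => if besti == -1 || j < besti then pvScanB idx pair j rest else pvScanB idx best besti rest
    | none => pvScanB idx best besti rest

def find_bpe_operation_alt (pairs : List (List String)) (bpe_operations : List (List String)) : List String × Int :=
  pvScanB (pvBuildIdx 0 PySem.Dict.empty bpe_operations) [] (-1) pairs

-- ===== PRECONDITION & SPEC =====
def Spec_find_bpe_operation (pairs : List (List String)) (bpe_operations : List (List String)) (out : List String × Int) : Prop := out = find_bpe_operation_alt pairs bpe_operations
instance (pairs : List (List String)) (bpe_operations : List (List String)) (out : List String × Int) : Decidable (Spec_find_bpe_operation pairs bpe_operations out) := by unfold Spec_find_bpe_operation; infer_instance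

-- ===== CLAIM (what is proved, stated in full; the proofs are below) =====
def Claim_equal_find_bpe_operation : Prop := ∀ (pairs : List (List String)) (bpe_operations : List (List String)), Dom_find_bpe_operation pairs bpe_operations → Spec_find_bpe_operation pairs bpe_operations (find_bpe_operation pairs bpe_operations)

-- ===== LEMMAS AND PROOFS =====

-- first index in ops of an element equal to p (first occurrence)
def pvHit (ops : List (List String)) (p : List String) : Option Nat :=
  List.findIdx? (fun q => q == p) ops

-- minimum of pvHit over pairs
def pvMinHit (ops : List (List String)) : List (List String) → Option Nat
  | [] => none
  | p :: ps =>
    match pvHit ops p, pvMinHit ops ps with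
    | none, r => r
    | some k, none => some k
    | some k, some m => some (min k m)

lemma pvInnerA_eq_contains (bpe : List String) (pairs : List (List String)) :
    pvInnerA bpe pairs = pairs.contains bpe := by
  induction pairs with
  | nil => rfl
  | cons p ps ih =>
    rw [pvInnerA, ih, List.contains_cons]
    by_cases h : bpe = p
    · subst h; simp
    · simp [h]

lemma pvHit_inv {ops : List (List String)} {p : List String} {k : Nat}
    (h : pvHit ops p = some k) :
    k < ops.length ∧ ops.getD k [] = p ∧ ∀ j < k, ops.getD j [] ≠ p := by
  rw [pvHit, List.findIdx?_eq_some_iff_getElem] at h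
  obtain ⟨hk, hpk, hmin⟩ := h
  refine ⟨hk, ?_, ?_⟩
  · simp only [beq_iff_eq] at hpk
    simp [List.getD_eq_getElem?_getD, List.getElem?_eq_getElem hk, hpk]
  · intro j hj hne
    have h1 := hmin j hj
    rw [List.getD_eq_getElem?_getD, List.getElem?_eq_getElem (lt_trans hj hk)] at hne
    simp at hne h1
    exact h1 hne

lemma pvBuildIdx_get (ops : List (List String)) :
    ∀ (i : Int) (d : PySem.Dict (List String) Int) (p : List String),
      (pvBuildIdx i d ops).get? p =
        (d.get? p).or ((pvHit ops p).map (fun k : Nat => i + (k : Int))) := by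
  induction ops with
  | nil =>
    intro i d p
    simp [pvBuildIdx, pvHit]
  | cons bpe rest ih =>
    intro i d p
    rw [pvBuildIdx, ih]
    by_cases hp : bpe = p
    · subst hp
      cases hd : d.get? bpe with
      | none =>
        simp [PySem.Dict.get?_insert_self, pvHit, List.findIdx?_cons]
      | some v =>
        simp [hd]
    · have hne : p ≠ bpe := Ne.symm hp
      have hd' : ∀ (b : Bool) (x : PySem.Dict (List String) Int),
          ((if b then d.insert bpe i else d).get? p) = d.get? p := by
        intro b _
        cases b with
        | false => rfl
        | true => exact PySem.Dict.get?_insert_of_ne d i hne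
      rw [hd' ((d.get? bpe).isNone) d]
      have hcons : pvHit (bpe :: rest) p = (pvHit rest p).map (· + 1) := by
        simp [pvHit, List.findIdx?_cons, hp]
      rw [hcons]
      cases hr : pvHit rest p with
      | none => simp
      | some k =>
        cases hdp : d.get? p with
        | none => simp only [Option.map_some, Option.none_or, Option.some.injEq]; omega
        | some v => simp

lemma pvScanB_char (ops : List (List String)) (idx : PySem.Dict (List String) Int)
    (hidx : ∀ p, idx.get? p = (pvHit ops p).map (fun k : Nat => (k : Int))) :
    ∀ (pairs : List (List String)) (best : List String) (besti : Int),
      ((best = [] ∧ besti = -1) ∨ (∃ k : Nat, pvHit ops best = some k ∧ besti = (k : Int))) →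
      pvScanB idx best besti pairs =
        match pvMinHit ops pairs with
        | none => (best, besti)
        | some m => if besti ≠ -1 ∧ besti ≤ (m : Int) then (best, besti) else (ops.getD m [], (m : Int)) := by
  intro pairs
  induction pairs with
  | nil => intro best besti _; rfl
  | cons pair ps ih =>
    intro best besti hinv
    rw [pvScanB, hidx pair]
    cases hp : pvHit ops pair with
    | none =>
      simp only [Option.map_none]
      rw [ih best besti hinv]
      simp [pvMinHit, hp]
    | some k =>
      simp only [Option.map_some]
      rcases hinv with ⟨hb, hbi⟩ | ⟨k0, hb, hbi⟩
      · subst hb; subst hbi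
        have hcond : ((-1 : Int) == -1 || decide ((k : Int) < -1)) = true := by simp
        rw [if_pos hcond, ih pair (k : Int) (Or.inr ⟨k, hp, rfl⟩)]
        have hgd : ops[k]?.getD [] = pair := by
          rw [← List.getD_eq_getElem?_getD]; exact (pvHit_inv hp).2.1
        cases hm : pvMinHit ops ps with
        | none =>
          simp [pvMinHit, hp, hm, hgd]
        | some m =>
          simp only [pvMinHit, hp, hm]
          by_cases hkm : k ≤ m
          · have : min k m = k := by omega
            rw [this]
            have hc : ((k : Int) ≠ -1 ∧ (k : Int) ≤ (m : Int)) := by constructor <;> omega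
            simp [hc, hgd]
          · have : min k m = m := by omega
            rw [this]
            have hc : ¬ ((k : Int) ≠ -1 ∧ (k : Int) ≤ (m : Int)) := by
              intro ⟨_, h2⟩; omega
            simp [hc]
            exact fun h => absurd h hkm
      · subst hbi
        by_cases hlt : k < k0
        · have hcond : (((k0 : Int)) == -1 || decide ((k : Int) < (k0 : Int))) = true := by
            simp; omega
          rw [if_pos hcond, ih pair (k : Int) (Or.inr ⟨k, hp, rfl⟩)]
          have hgd : ops[k]?.getD [] = pair := by
            rw [← List.getD_eq_getElem?_getD]; exact (pvHit_inv hp).2.1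
          cases hm : pvMinHit ops ps with
          | none =>
            have hnk : ¬ k0 ≤ k := by omega
            simp [pvMinHit, hp, hm, hnk, hgd]
          | some m =>
            simp only [pvMinHit, hp, hm]
            have hcg : ¬ (((k0 : Int)) ≠ -1 ∧ ((k0 : Int)) ≤ ((min k m : Nat) : Int)) := by
              intro ⟨_, h2⟩
              have : min k m ≤ k := by omega
              omega
            by_cases hkm : k ≤ m
            · have h1 : min k m = k := by omega
              rw [h1] at hcg ⊢
              have hc : ((k : Int) ≠ -1 ∧ (k : Int) ≤ (m : Int)) := by constructor <;> omega
              simp [hc, hcg, hgd]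
              exact fun h => absurd h (by omega)
            · have h1 : min k m = m := by omega
              rw [h1] at hcg ⊢
              have hc : ¬ ((k : Int) ≠ -1 ∧ (k : Int) ≤ (m : Int)) := by
                intro ⟨_, h2⟩; omega
              simp [hc, hcg]
              have a2 : ¬ k0 ≤ m := by omega
              simp [hkm, a2]
        · have hcond : (((k0 : Int)) == -1 || decide ((k : Int) < (k0 : Int))) = false := by
            simp; omega
          rw [if_neg (by simp; omega), ih best (k0 : Int) (Or.inr ⟨k0, hb, rfl⟩)]
          cases hm : pvMinHit ops ps with
          | none =>
            have hc : (((k0 : Int)) ≠ -1 ∧ ((k0 : Int)) ≤ (k : Int)) := by constructor <;> omega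
            simp [pvMinHit, hp, hm, hc]
          | some m =>
            simp only [pvMinHit, hp, hm]
            by_cases hk0m : k0 ≤ m
            · have hc : (((k0 : Int)) ≠ -1 ∧ ((k0 : Int)) ≤ (m : Int)) := by constructor <;> omega
              have hcg : (((k0 : Int)) ≠ -1 ∧ ((k0 : Int)) ≤ ((min k m : Nat) : Int)) := by
                constructor
                · omega
                · have : k0 ≤ min k m := by omega
                  omega
              simp [hc, hcg]
              exact fun h => absurd h hlt
            · have hc : ¬ (((k0 : Int)) ≠ -1 ∧ ((k0 : Int)) ≤ (m : Int)) := by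
                intro ⟨_, h2⟩; omega
              have h1 : min k m = m := by omega
              have hcg : ¬ (((k0 : Int)) ≠ -1 ∧ ((k0 : Int)) ≤ ((min k m : Nat) : Int)) := by
                rw [h1]; exact hc
              simp [hc, hcg, h1]

lemma pvMinHit_none_iff (ops : List (List String)) (pairs : List (List String)) :
    pvMinHit ops pairs = none ↔ ∀ p ∈ pairs, pvHit ops p = none := by
  induction pairs with
  | nil => simp [pvMinHit]
  | cons p ps ih =>
    cases hp : pvHit ops p with
    | none =>
      simp [pvMinHit, hp, ih]
    | some k =>
      constructor
      · intro h
        rw [pvMinHit, hp] at h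
        cases hm : pvMinHit ops ps <;> rw [hm] at h <;> cases h
      · intro h
        have h2 := h p (by simp)
        rw [hp] at h2; cases h2

lemma pvMinHit_some (ops : List (List String)) (pairs : List (List String)) (m : Nat)
    (h : pvMinHit ops pairs = some m) :
    (∃ p ∈ pairs, pvHit ops p = some m) ∧ (∀ p ∈ pairs, ∀ k, pvHit ops p = some k → m ≤ k) := by
  induction pairs generalizing m with
  | nil => simp [pvMinHit] at h
  | cons p ps ih =>
    cases hp : pvHit ops p with
    | none =>
      rw [pvMinHit, hp] at h
      obtain ⟨⟨q, hq, hqm⟩, hmin⟩ := ih m h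
      refine ⟨⟨q, by simp [hq], hqm⟩, ?_⟩
      intro r hr k hk
      rcases List.mem_cons.mp hr with rfl | hr
      · rw [hp] at hk; cases hk
      · exact hmin r hr k hk
    | some k0 =>
      rw [pvMinHit, hp] at h
      cases hm : pvMinHit ops ps with
      | none =>
        rw [hm] at h
        cases h
        refine ⟨⟨p, by simp, hp⟩, ?_⟩
        intro r hr k hk
        rcases List.mem_cons.mp hr with rfl | hr
        · rw [hp] at hk; cases hk; omega
        · exfalso
          have := (pvMinHit_none_iff ops ps).mp hm r hr
          rw [this] at hk; cases hk
      | some m0 =>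
        rw [hm] at h
        cases h
        obtain ⟨⟨q, hq, hqm⟩, hmin⟩ := ih m0 hm
        by_cases hle : k0 ≤ m0
        · have h1 : min k0 m0 = k0 := by omega
          rw [h1]
          refine ⟨⟨p, by simp, hp⟩, ?_⟩
          intro r hr k hk
          rcases List.mem_cons.mp hr with rfl | hr
          · rw [hp] at hk; cases hk; omega
          · have := hmin r hr k hk; omega
        · have h1 : min k0 m0 = m0 := by omega
          rw [h1]
          refine ⟨⟨q, by simp [hq], hqm⟩, ?_⟩
          intro r hr k hk
          rcases List.mem_cons.mp hr with rfl | hr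
          · rw [hp] at hk; cases hk; omega
          · exact hmin r hr k hk

lemma pvMinHit_eq_findIdx (ops pairs : List (List String)) :
    pvMinHit ops pairs = List.findIdx? (fun q => pairs.contains q) ops := by
  cases hf : List.findIdx? (fun q => pairs.contains q) ops with
  | none =>
    rw [List.findIdx?_eq_none_iff] at hf
    rw [pvMinHit_none_iff]
    intro p hp
    cases hh : pvHit ops p with
    | none => rfl
    | some k =>
      exfalso
      obtain ⟨hk, hget, _⟩ := pvHit_inv hh
      have hmem : p ∈ ops := by
        rw [← hget]
        rw [List.getD_eq_getElem?_getD, List.getElem?_eq_getElem hk]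
        exact List.getElem_mem hk
      have := hf p hmem
      simp at this
      exact this hp
  | some i =>
    rw [List.findIdx?_eq_some_iff_getElem] at hf
    obtain ⟨hi, hpi, hmin⟩ := hf
    simp only [List.contains_eq_mem, decide_eq_true_eq] at hpi
    -- pvHit ops ops[i] = some i
    have hhit : pvHit ops (ops[i]) = some i := by
      rw [pvHit, List.findIdx?_eq_some_iff_getElem]
      refine ⟨hi, by simp, ?_⟩
      intro j hj
      simp only [beq_iff_eq]
      intro heq
      have := hmin j hj
      simp only [List.contains_eq_mem, decide_eq_true_eq] at this
      rw [heq] at this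
      exact this hpi
    cases hm : pvMinHit ops pairs with
    | none =>
      exfalso
      have := (pvMinHit_none_iff ops pairs).mp hm (ops[i]) hpi
      rw [hhit] at this; cases this
    | some m =>
      obtain ⟨⟨q, hq, hqm⟩, hminall⟩ := pvMinHit_some ops pairs m hm
      have h1 : m ≤ i := hminall (ops[i]) hpi i hhit
      have h2 : i ≤ m := by
        by_contra hlt
        push Not at hlt
        obtain ⟨hk, hget, _⟩ := pvHit_inv hqm
        have := hmin m hlt
        simp only [List.contains_eq_mem, decide_eq_true_eq] at this
        apply this
        have heq : ops[m] = q := by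
          rw [← hget, List.getD_eq_getElem?_getD, List.getElem?_eq_getElem hk]; rfl
        rw [heq]
        exact hq
      rw [Nat.le_antisymm h1 h2]

lemma pvOuterA_char (pairs : List (List String)) (ops : List (List String)) :
    ∀ i : Int, pvOuterA pairs i ops =
      match List.findIdx? (fun q => pairs.contains q) ops with
      | none => ([], -1)
      | some k => (ops.getD k [], i + (k : Int)) := by
  induction ops with
  | nil => intro i; rfl
  | cons bpe rest ih =>
    intro i
    rw [pvOuterA, pvInnerA_eq_contains, List.findIdx?_cons]
    cases h : pairs.contains bpe with
    | true =>
      rw [if_pos rfl, if_pos rfl]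
      simp
    | false =>
      rw [if_neg (by simp), if_neg (by simp), ih (i + 1)]
      cases hf : List.findIdx? (fun q => pairs.contains q) rest with
      | none => rfl
      | some k =>
        simp only [Option.map_some, List.getD_cons_succ, Prod.mk.injEq]
        refine ⟨by trivial, by push_cast; ring⟩

-- ===== VERDICT (by name: the statement is the Claim_ definition above) =====
theorem find_bpe_operation_spec : Claim_equal_find_bpe_operation := by
  intro pairs ops _
  unfold Spec_find_bpe_operation find_bpe_operation find_bpe_operation_alt
  have hidx : ∀ p, (pvBuildIdx 0 PySem.Dict.empty ops).get? p
      = (pvHit ops p).map (fun k : Nat => (k : Int)) := by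
    intro p
    rw [pvBuildIdx_get]
    simp [PySem.Dict.get?_empty]
  rw [pvOuterA_char, pvScanB_char ops _ hidx pairs [] (-1) (Or.inl ⟨rfl, rfl⟩),
      pvMinHit_eq_findIdx]
  cases List.findIdx? (fun q => pairs.contains q) ops with
  | none => rfl
  | some k => simp
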